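-- pv_equiv track=rewrite | github.com/shin-ee-chen/BLA | utils_show.py | get_index_by_img_id
-- ===== SOURCE A (Python) =====
-- def get_index_by_img_id(img_id, caption_dict):
--     found_img = False
--     index_list = []
--     for index, caption in caption_dict.items():
--         if caption['image_id'] == img_id:
--             found_img = True
--             index_list.append(index)
--         elif found_img:
--             break
--     return index_list
-- ===== SOURCE B (Python) =====
-- def get_index_by_img_id(img_id, caption_dict):
--     keys = list(caption_dict)
--     flags = [caption['image_id'] == img_id for caption in caption_dict.values()]
--     if True not in flags:
--         return []
--     i = flags.index(True)
--     tail = flags[i:]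
--     j = len(keys) if False not in tail else i + tail.index(False)
--     return keys[i:j]
-- ===== Notes on version B (the rewrite author's own statement) =====
-- stated objective: alternative
-- what changed: Replaces A's single early-exit loop with found_img flag, append and break by a staged mask-and-slice computation: build the full boolean match mask, locate the run boundaries with index(True)/index(False), and return the key slice keys[i:j]; no early exit and no element-by-element output accumulation.
-- outside the precondition, e.g. on get_index_by_img_id(1, {0: {'image_id': 1}, 1: {'image_id': 2}, 2: {}}): A returns [0], B raises KeyError
import Mathlib
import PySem

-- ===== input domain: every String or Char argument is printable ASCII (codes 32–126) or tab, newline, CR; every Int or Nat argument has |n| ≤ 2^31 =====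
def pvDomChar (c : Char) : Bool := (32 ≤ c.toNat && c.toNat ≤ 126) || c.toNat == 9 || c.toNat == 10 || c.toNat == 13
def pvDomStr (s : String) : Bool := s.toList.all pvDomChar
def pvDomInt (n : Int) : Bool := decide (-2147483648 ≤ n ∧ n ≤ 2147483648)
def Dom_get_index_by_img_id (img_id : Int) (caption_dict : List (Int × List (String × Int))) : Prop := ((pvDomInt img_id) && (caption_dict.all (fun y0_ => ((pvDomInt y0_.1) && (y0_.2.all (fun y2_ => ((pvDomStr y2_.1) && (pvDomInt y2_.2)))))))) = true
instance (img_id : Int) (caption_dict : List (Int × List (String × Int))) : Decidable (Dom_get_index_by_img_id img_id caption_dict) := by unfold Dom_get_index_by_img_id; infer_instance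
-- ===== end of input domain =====

-- B replaces A's single early-exit flag/break loop by a staged mask-and-slice computation:
-- build the full boolean match mask, find the run boundaries with index, return the key slice (same cost).
-- Pre_ excludes caption dicts where some entry lacks the "image_id" key, on which Python A may raise KeyError.


-- ===== PORT A =====
-- loop with found_img flag and break; on a missing "image_id" key Python raises KeyError
-- (Pre_ excludes those inputs), the port just stops there.
def goA (img_id : Int) (found : Bool) (acc : List Int) :
    List (Int × List (String × Int)) → List Int
  | [] => acc
  | (index, caption) :: rest =>
    match PySem.Dict.get? (PySem.Dict.mk caption) "image_id" with
    | none => acc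
    | some v =>
      if v == img_id then goA img_id true (acc ++ [index]) rest
      else if found then acc
      else goA img_id found acc rest

def get_index_by_img_id (img_id : Int) (caption_dict : List (Int × List (String × Int))) : List Int :=
  goA img_id false [] caption_dict

-- ===== PORT B =====
-- caption['image_id'] == img_id per entry; a missing key (excluded by Pre_) yields false
-- where Python raises KeyError.
def maskB (img_id : Int) (caption_dict : List (Int × List (String × Int))) : List Bool :=
  caption_dict.map (fun p => PySem.Dict.get? (PySem.Dict.mk p.2) "image_id" == some img_id)

-- keys = list(caption_dict); flags = [... for caption in caption_dict.values()];
-- 'True not in flags' / flags.index(True) and 'False not in tail' / tail.index(False)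
-- are ported together as a match on PySem.List.index?; slices via PySem.List.slice.
def get_index_by_img_id_alt (img_id : Int) (caption_dict : List (Int × List (String × Int))) : List Int :=
  let keys := caption_dict.map (·.1)
  let flags := maskB img_id caption_dict
  match PySem.List.index? flags true with
  | none => []
  | some i =>
    let tail := PySem.List.slice flags (some (i : Int)) none
    let j : Nat :=
      match PySem.List.index? tail false with
      | none => keys.length
      | some k => i + k
    PySem.List.slice keys (some (i : Int)) (some (j : Int))

-- ===== PRECONDITION & SPEC =====
-- Pre_ excludes caption dicts where some entry lacks the "image_id" key: Python A raises
-- KeyError on any such entry it reaches (it can still return if the entry lies after the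
-- break point — a narrow corner this Pre_ also excludes, see the claim's cites; B evaluates
-- every entry, so it raises on all such inputs).
def Pre_get_index_by_img_id (img_id : Int) (caption_dict : List (Int × List (String × Int))) : Prop :=
  ∀ p ∈ caption_dict, (PySem.Dict.get? (PySem.Dict.mk p.2) "image_id").isSome = true
instance (img_id : Int) (caption_dict : List (Int × List (String × Int))) : Decidable (Pre_get_index_by_img_id img_id caption_dict) := by unfold Pre_get_index_by_img_id; infer_instance
def pvWitness_get_index_by_img_id : Int × (List (Int × List (String × Int))) :=
  (1, [(0, [("image_id", 1)]), (1, [("image_id", 2)])])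

def Spec_get_index_by_img_id (img_id : Int) (caption_dict : List (Int × List (String × Int))) (out : List Int) : Prop := out = get_index_by_img_id_alt img_id caption_dict
instance (img_id : Int) (caption_dict : List (Int × List (String × Int))) (out : List Int) : Decidable (Spec_get_index_by_img_id img_id caption_dict out) := by unfold Spec_get_index_by_img_id; infer_instance

-- ===== CLAIM (what is proved, stated in full; the proofs are below) =====
def Claim_equal_get_index_by_img_id : Prop := ∀ (img_id : Int) (caption_dict : List (Int × List (String × Int))), Dom_get_index_by_img_id img_id caption_dict → Pre_get_index_by_img_id img_id caption_dict → Spec_get_index_by_img_id img_id caption_dict (get_index_by_img_id img_id caption_dict)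

-- ===== LEMMAS AND PROOFS =====

-- xs[:k+1] with a Nat-cast successor bound, the shape left by Option.map (+1)
theorem slice_to_cast_succ {α : Type} (xs : List α) (k : Nat) :
    PySem.List.slice xs none (some ((k : Int) + 1)) = xs.take (k + 1) := by
  rw [← Nat.cast_add_one, PySem.List.slice_to_natCast]

-- once found_img is set, the rest of A's loop takes the leading matching run (prefixed by acc)
theorem goA_found (img_id : Int) (l : List (Int × List (String × Int))) (acc : List Int)
    (h : ∀ p ∈ l, (PySem.Dict.get? (PySem.Dict.mk p.2) "image_id").isSome = true) :
    goA img_id true acc l =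
      acc ++ (l.map (·.1)).take
        ((PySem.List.index? (maskB img_id l) false).getD (maskB img_id l).length) := by
  induction l generalizing acc with
  | nil => simp [goA, maskB]
  | cons p rest ih =>
    obtain ⟨index, caption⟩ := p
    have hk := h (index, caption) (by simp)
    obtain ⟨v, hv⟩ := Option.isSome_iff_exists.mp hk
    have hrest : ∀ p ∈ rest, (PySem.Dict.get? (PySem.Dict.mk p.2) "image_id").isSome = true :=
      fun p hp => h p (by simp [hp])
    by_cases hveq : v == img_id
    · rw [show maskB img_id ((index, caption) :: rest)
          = true :: maskB img_id rest by simp [maskB, hv, hveq]]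
      rw [PySem.List.index?_cons_of_ne (maskB img_id rest) (by decide)]
      simp only [goA, hv, hveq, if_true]
      rw [ih _ hrest]
      cases hidx : PySem.List.index? (maskB img_id rest) false <;>
        simp [List.take_succ_cons, List.append_assoc, maskB]
    · rw [show maskB img_id ((index, caption) :: rest)
          = false :: maskB img_id rest by simp [maskB, hv, hveq]]
      rw [PySem.List.index?_cons_self]
      simp [goA, hv, hveq]

-- before any match, A's loop computes B's mask-and-slice expression (prefixed by acc)
theorem goA_searching (img_id : Int) (l : List (Int × List (String × Int))) (acc : List Int)
    (h : ∀ p ∈ l, (PySem.Dict.get? (PySem.Dict.mk p.2) "image_id").isSome = true) :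
    goA img_id false acc l = acc ++ get_index_by_img_id_alt img_id l := by
  induction l generalizing acc with
  | nil => simp [goA, get_index_by_img_id_alt, maskB]
  | cons p rest ih =>
    obtain ⟨index, caption⟩ := p
    have hk := h (index, caption) (by simp)
    obtain ⟨v, hv⟩ := Option.isSome_iff_exists.mp hk
    have hrest : ∀ p ∈ rest, (PySem.Dict.get? (PySem.Dict.mk p.2) "image_id").isSome = true :=
      fun p hp => h p (by simp [hp])
    by_cases hveq : v == img_id
    · -- head matches: index? flags true = some 0, the slice is a take of the whole list
      have hmask : maskB img_id ((index, caption) :: rest)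
          = true :: maskB img_id rest := by simp [maskB, hv, hveq]
      simp only [goA, hv, hveq, if_true]
      rw [goA_found img_id rest _ hrest]
      simp only [get_index_by_img_id_alt]
      rw [hmask, PySem.List.index?_cons_self]
      simp only [Nat.cast_zero, zero_add, PySem.List.slice_zero_start,
        PySem.List.slice_none_none,
        PySem.List.index?_cons_of_ne (maskB img_id rest) (show (true : Bool) ≠ false by decide)]
      cases hidx : PySem.List.index? (maskB img_id rest) false with
      | none => simp [slice_to_cast_succ, List.take_succ_cons, List.append_assoc, maskB]
      | some k => simp [slice_to_cast_succ, List.take_succ_cons, List.append_assoc]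
    · -- head does not match: both sides reduce to the tail
      have hmask : maskB img_id ((index, caption) :: rest)
          = false :: maskB img_id rest := by simp [maskB, hv, hveq]
      simp only [goA, hv, hveq, Bool.false_eq_true, if_false]
      rw [ih _ hrest]
      congr 1
      simp only [get_index_by_img_id_alt]
      rw [hmask, PySem.List.index?_cons_of_ne (maskB img_id rest) (by decide)]
      cases hidx : PySem.List.index? (maskB img_id rest) true with
      | none => simp
      | some i =>
        simp only [Option.map_some]
        rw [PySem.List.slice_from_natCast, PySem.List.slice_from_natCast]
        simp only [List.drop_succ_cons]
        cases hidx2 : PySem.List.index? (List.drop i (maskB img_id rest)) false with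
        | none =>
          simp only [hidx2]
          rw [PySem.List.slice_natCast, PySem.List.slice_natCast]
          simp
        | some k =>
          simp only [hidx2]
          rw [show i + 1 + k = (i + k) + 1 by omega]
          rw [PySem.List.slice_natCast, PySem.List.slice_natCast]
          simp [Nat.succ_sub_succ]

-- ===== VERDICT (by name: the statement is the Claim_ definition above) =====
theorem get_index_by_img_id_spec : Claim_equal_get_index_by_img_id := by
  intro img_id caption_dict _ hpre
  unfold Spec_get_index_by_img_id get_index_by_img_id
  simpa using goA_searching img_id caption_dict [] hpre
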